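-- pv_equiv track=rewrite | github.com/SaarShai/Primes-Equispaced | experiments/monotone_functionals.py | farey_bd_pairs
-- ===== SOURCE A (Python) =====
-- def farey_sequence(N):
--     """Generate Farey sequence F_N as list of (p, q) pairs (p/q in lowest terms)."""
--     sequence = []
--     a, b, c, d = 0, 1, 1, N
--     sequence.append((a, b))
--     while (c, d) != (1, 1) or not sequence:
--         sequence.append((c, d))
--         k = (N + b) // d
--         a, b, c, d = c, d, k*c - a, k*d - b
--     sequence.append((1, 1))
--     return sequence
--
-- def farey_bd_pairs(N):
--     """
--     Return list of (b, d) pairs for consecutive Farey fractions a/b < c/d in F_N.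
--     The gap size is 1/(b*d) by the Farey property.
--     """
--     seq = farey_sequence(N)
--     pairs = []
--     for i in range(len(seq)-1):
--         _, b = seq[i]
--         _, d = seq[i+1]
--         pairs.append((b, d))
--     return pairs
-- ===== SOURCE B (Python) =====
-- def farey_bd_pairs(N):
--     """
--     Return list of (b, d) pairs for consecutive Farey fractions a/b < c/d in F_N.
--     Single pass over the Stern-Brocot mediant recurrence: emit each (prev, d)
--     on the fly, keeping only the previous denominator; the Farey sequence
--     itself is never materialized.
--     """
--     a, b, c, d = 0, 1, 1, N
--     prev = 1
--     pairs = []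
--     while (c, d) != (1, 1):
--         pairs.append((prev, d))
--         prev = d
--         k = (N + b) // d
--         a, b, c, d = c, d, k*c - a, k*d - b
--     pairs.append((prev, 1))
--     return pairs
-- ===== Notes on version B (the rewrite author's own statement) =====
-- stated objective: alternative
-- what changed: B fuses A's two phases (materialize the whole Farey sequence, then an index loop pairing adjacent denominators) into one pass over the mediant recurrence that keeps only the previous denominator and emits each (prev, d) pair directly.
-- outside the precondition, e.g. on farey_bd_pairs(0): A raises ZeroDivisionError, B raises ZeroDivisionError
import Mathlib
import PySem

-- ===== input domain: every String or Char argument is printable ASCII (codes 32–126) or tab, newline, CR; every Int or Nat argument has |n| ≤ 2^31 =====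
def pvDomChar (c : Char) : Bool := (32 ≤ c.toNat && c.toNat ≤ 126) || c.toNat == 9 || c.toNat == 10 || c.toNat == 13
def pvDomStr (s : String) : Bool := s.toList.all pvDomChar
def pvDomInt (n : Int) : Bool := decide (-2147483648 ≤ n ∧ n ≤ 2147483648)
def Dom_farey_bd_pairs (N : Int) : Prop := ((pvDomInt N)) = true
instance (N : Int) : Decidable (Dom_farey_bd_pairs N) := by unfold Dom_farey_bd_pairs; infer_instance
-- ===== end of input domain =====

-- B fuses A's two phases (build the Farey sequence, then pair adjacent denominators)
-- into one pass over the mediant recurrence that keeps only the previous denominator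
-- and emits each (prev, d) pair directly; no materialized sequence.

-- ===== PORT A =====
-- The Python while loop is ported with a fuel counter; fuel N² + 2 exceeds the loop's
-- iteration count (|F_N| - 2 ≤ N(N+1)/2) for every N ≥ 1, so the port is exact on Pre_.
-- The growing Python list is accumulated in reverse (cons) and reversed once at the end;
-- the loop state a,b,c,d is passed as four scalar arguments.
def fareyLoopA (N : Int) : Nat → Int → Int → Int → Int → List (Int × Int) → List (Int × Int)
  | 0, _, _, _, _, seq => seq
  | fuel + 1, a, b, c, d, seq =>
    if (c, d) ≠ ((1 : Int), (1 : Int)) ∨ seq = [] then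
      let seq' := (c, d) :: seq
      let k := PySem.Int.floordiv (N + b) d
      fareyLoopA N fuel c d (k * c - a) (k * d - b) seq'
    else seq

def fareySequence (N : Int) : List (Int × Int) :=
  (fareyLoopA N ((N.toNat * N.toNat) + 2) 0 1 1 N [(0, 1)]).reverse ++ [(1, 1)]

-- the index loop 'for i in range(len(seq)-1): pairs.append((seq[i][1], seq[i+1][1]))'
-- rendered as the recursion over consecutive elements it walks, accumulating in reverse
def pairsGo : List (Int × Int) → List (Int × Int) → List (Int × Int)
  | acc, (_, b) :: (c, d) :: t => pairsGo ((b, d) :: acc) ((c, d) :: t)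
  | acc, _ => acc.reverse

def farey_bd_pairs (N : Int) : List (Int × Int) :=
  pairsGo [] (fareySequence N)

-- ===== PORT B =====
def fareyLoopB (N : Int) : Nat → Int → Int → Int → Int → Int → List (Int × Int) →
    List (Int × Int) × Int
  | 0, prev, _, _, _, _, pairs => (pairs, prev)
  | fuel + 1, prev, a, b, c, d, pairs =>
    if (c, d) ≠ ((1 : Int), (1 : Int)) then
      let pairs' := (prev, d) :: pairs
      let k := PySem.Int.floordiv (N + b) d
      fareyLoopB N fuel d c d (k * c - a) (k * d - b) pairs'
    else (pairs, prev)

def farey_bd_pairs_alt (N : Int) : List (Int × Int) :=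
  let r := fareyLoopB N ((N.toNat * N.toNat) + 2) 1 0 1 1 N []
  r.1.reverse ++ [(r.2, 1)]

-- ===== PRECONDITION & SPEC =====
-- Pre_ excludes exactly N ≤ 0: N = 0 raises ZeroDivisionError in A, N < 0 never terminates.
def Pre_farey_bd_pairs (N : Int) : Prop := 1 ≤ N
instance (N : Int) : Decidable (Pre_farey_bd_pairs N) := by unfold Pre_farey_bd_pairs; infer_instance
def pvWitness_farey_bd_pairs : Int := (4)

def Spec_farey_bd_pairs (N : Int) (out : List (Int × Int)) : Prop := out = farey_bd_pairs_alt N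
instance (N : Int) (out : List (Int × Int)) : Decidable (Spec_farey_bd_pairs N out) := by unfold Spec_farey_bd_pairs; infer_instance

-- ===== CLAIM (what is proved, stated in full; the proofs are below) =====
def Claim_equal_farey_bd_pairs : Prop := ∀ (N : Int), Dom_farey_bd_pairs N → Pre_farey_bd_pairs N → Spec_farey_bd_pairs N (farey_bd_pairs N)

-- ===== LEMMAS AND PROOFS =====

-- proof-side view of A's loop: just the list of elements it appends, in order
def coreA (N : Int) : Nat → Int → Int → Int → Int → List (Int × Int)
  | 0, _, _, _, _ => []
  | fuel + 1, a, b, c, d =>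
    if (c, d) ≠ ((1 : Int), (1 : Int)) then
      let k := PySem.Int.floordiv (N + b) d
      (c, d) :: coreA N fuel c d (k * c - a) (k * d - b)
    else []

-- proof-side view of the pairing step: adjacent second components
def adjPairs : List (Int × Int) → List (Int × Int)
  | (_, b) :: (c, d) :: t => (b, d) :: adjPairs ((c, d) :: t)
  | _ => []

theorem pairsGo_eq : ∀ (l acc : List (Int × Int)), pairsGo acc l = acc.reverse ++ adjPairs l := by
  intro l
  induction l with
  | nil => intro acc; simp [pairsGo, adjPairs]
  | cons x t ih =>
    intro acc
    rcases x with ⟨p, b⟩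
    cases t with
    | nil => simp [pairsGo, adjPairs]
    | cons y t' =>
      rcases y with ⟨c, d⟩
      rw [show pairsGo acc ((p, b) :: (c, d) :: t') = pairsGo ((b, d) :: acc) ((c, d) :: t') from rfl,
        ih]
      simp [adjPairs]

theorem fareyLoopA_rev (N : Int) :
    ∀ (fuel : Nat) (a b c d : Int) (rev : List (Int × Int)), rev ≠ [] →
      fareyLoopA N fuel a b c d rev = (coreA N fuel a b c d).reverse ++ rev := by
  intro fuel
  induction fuel with
  | zero => intro a b c d rev _; simp [fareyLoopA, coreA]
  | succ n ih =>
    intro a b c d rev hr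
    by_cases hc : (c, d) = ((1 : Int), (1 : Int))
    · simp [fareyLoopA, coreA, hc, hr]
    · simp only [fareyLoopA, coreA]
      rw [if_pos (Or.inl hc), if_pos hc, ih _ _ _ _ ((c, d) :: rev) (by simp)]
      simp

theorem loopB_adjPairs (N : Int) :
    ∀ (fuel : Nat) (a b c d prev x : Int) (acc : List (Int × Int)),
      (fareyLoopB N fuel prev a b c d acc).1.reverse ++ [((fareyLoopB N fuel prev a b c d acc).2, 1)] =
        acc.reverse ++ adjPairs ((x, prev) :: coreA N fuel a b c d ++ [(1, 1)]) := by
  intro fuel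
  induction fuel with
  | zero => intro a b c d prev x acc; simp [fareyLoopB, coreA, adjPairs]
  | succ n ih =>
    intro a b c d prev x acc
    by_cases hc : (c, d) = ((1 : Int), (1 : Int))
    · simp [fareyLoopB, coreA, hc, adjPairs]
    · simp only [fareyLoopB, coreA]
      rw [if_pos hc, if_pos hc, ih _ _ _ _ d c ((prev, d) :: acc)]
      simp [adjPairs]

-- ===== VERDICT (by name: the statement is the Claim_ definition above) =====
theorem farey_bd_pairs_spec : Claim_equal_farey_bd_pairs := by
  intro N _ _
  unfold Spec_farey_bd_pairs farey_bd_pairs fareySequence farey_bd_pairs_alt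
  rw [pairsGo_eq, fareyLoopA_rev N _ _ _ _ _ [(0, 1)] (by simp), loopB_adjPairs N _ _ _ _ _ 1 0 []]
  simp
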